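-- pv_equiv track=rewrite | github.com/sparta-miracle/algorithm_study | minseon/22_12_06_02.py | solution
-- ===== SOURCE A (Python) =====
-- def solution(nums,k):
--     n = []
--     s = 0
--     for x in nums*k:
--         n.append(x)
--     for a in range(1,k):
--         s+=2
--     answer = n[s]
--     return answer
-- ===== SOURCE B (Python) =====
-- def solution(nums, k):
--     return nums[(2 * (k - 1)) % len(nums)]
-- ===== Notes on version B (the rewrite author's own statement) =====
-- stated objective: faster
-- what changed: Instead of materialising nums*k and counting s up by 2 in a loop, B indexes nums once at (2*(k-1)) mod len(nums).
import Mathlib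
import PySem

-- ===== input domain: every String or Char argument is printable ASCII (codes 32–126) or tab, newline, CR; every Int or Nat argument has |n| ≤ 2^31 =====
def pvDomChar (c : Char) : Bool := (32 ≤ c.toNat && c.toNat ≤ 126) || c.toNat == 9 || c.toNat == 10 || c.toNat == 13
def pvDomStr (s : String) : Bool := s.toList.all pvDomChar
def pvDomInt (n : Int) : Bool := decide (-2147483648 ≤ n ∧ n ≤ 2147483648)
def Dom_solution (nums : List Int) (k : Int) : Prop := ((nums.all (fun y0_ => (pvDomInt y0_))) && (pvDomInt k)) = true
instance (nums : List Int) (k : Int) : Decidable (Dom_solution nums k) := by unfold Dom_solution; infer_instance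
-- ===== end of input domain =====

-- B replaces A's O(n*k) list materialisation and counting loop by one modular index: nums[(2*(k-1)) % len(nums)].

-- ===== PORT A =====
def solution (nums : List Int) (k : Int) : Int :=
  -- n = []; for x in nums*k: n.append(x)   (append ported as cons + final reverse, Python's O(1) append)
  let n : List Int := (((List.replicate k.toNat nums).flatten).foldl (fun acc x => x :: acc) []).reverse
  -- s = 0; for a in range(1,k): s += 2
  let s : Int := (PySem.List.pyRange 1 k 1).foldl (fun s _ => s + 2) 0
  -- answer = n[s]  (IndexError excluded by Pre_solution)
  PySem.List.pyGetD n s 0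

-- ===== PORT B =====
def solution_alt (nums : List Int) (k : Int) : Int :=
  PySem.List.pyGetD nums (PySem.Int.mod (2 * (k - 1)) (nums.length : Int)) 0

-- ===== PRECONDITION & SPEC =====
-- Exactly the inputs where A's n[s] does not raise IndexError: k ≥ 1 and s = 2*(k-1) < len(nums)*k.
def Pre_solution (nums : List Int) (k : Int) : Prop :=
  1 ≤ k ∧ 2 * (k - 1) < (nums.length : Int) * k
instance (nums : List Int) (k : Int) : Decidable (Pre_solution nums k) := by
  unfold Pre_solution; infer_instance

def pvWitness_solution : List Int × Int := ([1, 2, 3], 3)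

def Spec_solution (nums : List Int) (k : Int) (out : Int) : Prop := out = solution_alt nums k
instance (nums : List Int) (k : Int) (out : Int) : Decidable (Spec_solution nums k out) := by
  unfold Spec_solution; infer_instance

-- ===== CLAIM (what is proved, stated in full; the proofs are below) =====
def Claim_equal_solution : Prop := ∀ (nums : List Int) (k : Int), Dom_solution nums k → Pre_solution nums k → Spec_solution nums k (solution nums k)

-- ===== LEMMAS AND PROOFS =====

-- the append loop (cons + reverse) rebuilds its input
lemma foldl_cons_reverse {α : Type} (l : List α) :
    (l.foldl (fun acc x => x :: acc) []).reverse = l := by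
  have h : ∀ (acc : List α), l.foldl (fun acc x => x :: acc) acc = l.reverse ++ acc := by
    induction l with
    | nil => intro acc; simp
    | cons x xs ih => intro acc; simp [List.foldl, ih]
  rw [h, List.append_nil, List.reverse_reverse]

-- the counting loop computes init + 2*len
lemma foldl_add_two (l : List Int) (init : Int) :
    l.foldl (fun s _ => s + 2) init = init + 2 * l.length := by
  induction l generalizing init with
  | nil => simp
  | cons x xs ih => simp [List.foldl, ih]; ring

-- indexing the m-fold repetition of xs is indexing xs modulo its length
lemma getElem_flatten_replicate {α : Type} (m : Nat) (xs : List α) (i : Nat)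
    (h : i < xs.length * m) :
    ((List.replicate m xs).flatten)[i]'(by simpa [Nat.mul_comm] using h) =
      xs[i % xs.length]'(Nat.mod_lt _ (by
        rcases Nat.eq_zero_or_pos xs.length with h0 | h0
        · rw [h0] at h; omega
        · exact h0)) := by
  induction m generalizing i with
  | zero => omega
  | succ m ih =>
    have hlen : 0 < xs.length := by
      rcases Nat.eq_zero_or_pos xs.length with h0 | h0
      · rw [h0] at h; omega
      · exact h0
    simp only [List.replicate_succ, List.flatten_cons]
    by_cases hi : i < xs.length
    · rw [List.getElem_append_left hi]
      congr 1
      exact (Nat.mod_eq_of_lt hi).symm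
    · have h' : i - xs.length < xs.length * m := by
        have h2 : xs.length * (m + 1) = xs.length * m + xs.length := by ring
        omega
      rw [List.getElem_append_right (by omega)]
      rw [ih (i - xs.length) h']
      congr 1
      rw [← Nat.mod_eq_sub_mod (by omega)]

lemma solution_eq_aux (nums : List Int) (k : Int) (_hdom : Dom_solution nums k)
    (hpre : Pre_solution nums k) : Spec_solution nums k (solution nums k) := by
  obtain ⟨hk, hs⟩ := hpre
  have hlen : 0 < nums.length := by
    by_contra h
    have h0 : nums.length = 0 := by omega
    rw [h0] at hs
    simp at hs
    omega
  unfold Spec_solution solution solution_alt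
  dsimp only
  rw [foldl_cons_reverse]
  rw [foldl_add_two]
  rw [PySem.List.length_pyRange_one 1 k]
  have htn : ((k - 1).toNat : Int) = k - 1 := Int.toNat_of_nonneg (by omega)
  rw [htn, zero_add]
  set s : Int := 2 * (k - 1) with hsdef
  have hs0 : 0 ≤ s := by omega
  have hflatn : ((List.replicate k.toNat nums).flatten).length = nums.length * k.toNat := by
    simp [Nat.mul_comm]
  have hflatlen : (((List.replicate k.toNat nums).flatten).length : Int) = (nums.length : Int) * k := by
    rw [hflatn]
    push_cast
    rw [Int.toNat_of_nonneg (by omega)]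
  have hsu : s < (((List.replicate k.toNat nums).flatten).length : Int) := by
    rw [hflatlen]; omega
  rw [PySem.List.pyGetD_eq_getElem _ 0 hs0 hsu]
  have hmodpos : 0 < (nums.length : Int) := by exact_mod_cast hlen
  rw [PySem.Int.mod_eq_emod_of_pos hmodpos]
  have hm0 : 0 ≤ s % (nums.length : Int) := Int.emod_nonneg s (by omega)
  have hmlt : s % (nums.length : Int) < (nums.length : Int) := Int.emod_lt_of_pos s hmodpos
  rw [PySem.List.pyGetD_eq_getElem _ 0 hm0 hmlt]
  have hsnat : (s.toNat : Int) = s := Int.toNat_of_nonneg hs0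
  have hcast : (s % (nums.length : Int)).toNat = s.toNat % nums.length := by
    have h1 : ((s.toNat % nums.length : Nat) : Int) = s % (nums.length : Int) := by
      push_cast [hsnat]
      rfl
    rw [← h1, Int.toNat_natCast]
  have hbound : s.toNat < nums.length * k.toNat := by
    have : ((nums.length * k.toNat : Nat) : Int) = (nums.length : Int) * k := by
      push_cast
      rw [Int.toNat_of_nonneg (by omega)]
    omega
  simp only [hcast]
  exact getElem_flatten_replicate k.toNat nums s.toNat hbound

-- ===== VERDICT (by name: the statement is the Claim_ definition above) =====
theorem solution_spec : Claim_equal_solution := by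
  intro nums k hdom hpre
  exact solution_eq_aux nums k hdom hpre
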